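-- pv_equiv track=rewrite | github.com/oster-field/Sakhalin | Sakhalin/Main.py | extractlastnumber
-- ===== SOURCE A (Python) =====
-- def extractlastnumber(string):
--     last_space_index = string.rfind(" ")
--     if last_space_index != -1:
--         substring = string[last_space_index + 1:]
--         numbers = "".join([c for c in substring if c.isdigit()])
--         if numbers:
--             return int(numbers)
--     return None
-- ===== SOURCE B (Python) =====
-- def extractlastnumber(string):
--     buf = []
--     for i in range(len(string) - 1, -1, -1):
--         c = string[i]
--         if c == " ":
--             if buf:
--                 return int("".join(reversed(buf)))
--             return None
--         if c.isdigit():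
--             buf.append(c)
--     return None
-- ===== Notes on version B (the rewrite author's own statement) =====
-- stated objective: alternative
-- what changed: Replaces rfind+slice+digit-comprehension (three passes over the tail) with a single backward scan that accumulates digit characters and decides the moment it meets the first space.
import Mathlib
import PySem

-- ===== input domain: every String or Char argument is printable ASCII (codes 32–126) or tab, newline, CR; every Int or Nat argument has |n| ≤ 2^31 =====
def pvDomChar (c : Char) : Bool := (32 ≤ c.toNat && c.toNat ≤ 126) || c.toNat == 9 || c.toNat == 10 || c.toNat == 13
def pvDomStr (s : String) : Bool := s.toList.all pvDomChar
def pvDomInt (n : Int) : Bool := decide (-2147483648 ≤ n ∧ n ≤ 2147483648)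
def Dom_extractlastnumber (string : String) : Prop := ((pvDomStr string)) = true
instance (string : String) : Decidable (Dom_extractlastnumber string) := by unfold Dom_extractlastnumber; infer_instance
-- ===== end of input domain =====

-- B replaces rfind + slice + comprehension by one backward scan that accumulates digits
-- and stops at the first space (objective: alternative single-pass decomposition).

-- ===== PORT A =====
-- literal port of A: rfind(" "), slice after it, keep the digits, int() of them
def extractlastnumber (string : String) : Option Int :=
  let s := string.toList
  let lastSpaceIndex := PySem.Chars.rfind s [' ']
  if lastSpaceIndex ≠ -1 then
    let substring := PySem.List.slice s (some (lastSpaceIndex + 1)) none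
    let numbers := substring.filter PySem.Chars.isdigit
    if numbers ≠ [] then PySem.Int.ofChars? numbers
    else none
  else none

-- ===== PORT B =====
-- the backward loop of Source B; Python appends to buf and reverses at the end, the port
-- prepends while scanning backwards, so buf is already in forward order at the space
def extractlastnumberAltGo : List Char → List Char → Option Int
  | [], _ => none
  | c :: rest, buf =>
    if c = ' ' then
      if buf = [] then none else PySem.Int.ofChars? buf
    else if PySem.Chars.isdigit c then extractlastnumberAltGo rest (c :: buf)
    else extractlastnumberAltGo rest buf

def extractlastnumber_alt (string : String) : Option Int :=
  extractlastnumberAltGo string.toList.reverse []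

-- ===== PRECONDITION & SPEC =====
def Spec_extractlastnumber (string : String) (out : Option Int) : Prop := out = extractlastnumber_alt string
instance (string : String) (out : Option Int) : Decidable (Spec_extractlastnumber string out) := by unfold Spec_extractlastnumber; infer_instance

-- ===== CLAIM (what is proved, stated in full; the proofs are below) =====
def Claim_equal_extractlastnumber : Prop := ∀ (string : String), Dom_extractlastnumber string → Spec_extractlastnumber string (extractlastnumber string)

-- ===== LEMMAS AND PROOFS =====

theorem prefix_space_iff (s : List Char) (j : Nat) :
    ([' '].isPrefixOf (s.drop j)) = true ↔ s[j]? = some ' ' := by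
  rw [← List.head?_drop]
  cases s.drop j with
  | nil => simp [List.isPrefixOf]
  | cons c t =>
    simp [List.isPrefixOf]
    exact eq_comm

theorem rfind_go_no_space (s : List Char) (k : Nat)
    (h : ∀ j, j ≤ k → s[j]? ≠ some ' ') :
    PySem.Chars.rfind.go s [' '] k = -1 := by
  induction k with
  | zero =>
    have hp : ¬ ([' '].isPrefixOf s) = true := by
      have := (prefix_space_iff s 0).not.mpr (h 0 le_rfl)
      simpa using this
    simp only [PySem.Chars.rfind.go]
    rw [if_neg hp]
  | succ n ih =>
    have hp : ¬ ([' '].isPrefixOf (s.drop (n+1))) = true :=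
      (prefix_space_iff s (n+1)).not.mpr (h (n+1) le_rfl)
    simp only [PySem.Chars.rfind.go]
    rw [if_neg hp]
    exact ih (fun j hj => h j (Nat.le_succ_of_le hj))

theorem rfind_go_last (s : List Char) (k j0 : Nat)
    (hj0 : j0 ≤ k) (hmem : s[j0]? = some ' ')
    (habove : ∀ j, j0 < j → j ≤ k → s[j]? ≠ some ' ') :
    PySem.Chars.rfind.go s [' '] k = (j0 : Int) := by
  induction k with
  | zero =>
    interval_cases j0
    have hp : ([' '].isPrefixOf s) = true := by
      have := (prefix_space_iff s 0).mpr hmem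
      simpa using this
    simp only [PySem.Chars.rfind.go]
    rw [if_pos hp]
    simp
  | succ n ih =>
    by_cases hj : j0 = n + 1
    · subst hj
      simp only [PySem.Chars.rfind.go]
      rw [if_pos ((prefix_space_iff s (n+1)).mpr hmem)]
    · have hle : j0 ≤ n := by omega
      have hp : ¬ ([' '].isPrefixOf (s.drop (n+1))) = true :=
        (prefix_space_iff s (n+1)).not.mpr (habove (n+1) (by omega) le_rfl)
      simp only [PySem.Chars.rfind.go]
      rw [if_neg hp]
      exact ih hle (fun j h1 h2 => habove j h1 (Nat.le_succ_of_le h2))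

theorem exists_last_split (s : List Char) (h : ' ' ∈ s) :
    ∃ pre suf, s = pre ++ ' ' :: suf ∧ ' ' ∉ suf := by
  induction s with
  | nil => simp at h
  | cons c t ih =>
    by_cases ht : ' ' ∈ t
    · obtain ⟨pre, suf, heq, hns⟩ := ih ht
      exact ⟨c :: pre, suf, by simp [heq], hns⟩
    · have hc : c = ' ' := by
        rcases List.mem_cons.mp h with h' | h'
        · exact h'.symm
        · exact absurd h' ht
      exact ⟨[], t, by simp [hc], ht⟩

theorem altGo_no_space (rs t buf : List Char) (h : ' ' ∉ rs) :
    extractlastnumberAltGo (rs ++ ' ' :: t) buf =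
      (if (rs.filter PySem.Chars.isdigit).reverse ++ buf = [] then none
       else PySem.Int.ofChars? ((rs.filter PySem.Chars.isdigit).reverse ++ buf)) := by
  induction rs generalizing buf with
  | nil => simp [extractlastnumberAltGo]
  | cons c rs' ih =>
    have hc : c ≠ ' ' := fun hc => h (by simp [hc])
    have h' : ' ' ∉ rs' := fun hm => h (by simp [hm])
    by_cases hd : PySem.Chars.isdigit c
    · simp only [List.cons_append, extractlastnumberAltGo, if_neg hc, if_pos hd]
      rw [ih (c :: buf) h']
      simp [hd]
    · simp only [List.cons_append, extractlastnumberAltGo, if_neg hc, if_neg hd]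
      rw [ih buf h']
      simp [hd]

theorem altGo_all_no_space (rs buf : List Char) (h : ' ' ∉ rs) :
    extractlastnumberAltGo rs buf = none := by
  induction rs generalizing buf with
  | nil => rfl
  | cons c rs' ih =>
    have hc : c ≠ ' ' := fun hc => h (by simp [hc])
    have h' : ' ' ∉ rs' := fun hm => h (by simp [hm])
    by_cases hd : PySem.Chars.isdigit c
    · simp only [extractlastnumberAltGo, if_neg hc, if_pos hd]; exact ih _ h'
    · simp only [extractlastnumberAltGo, if_neg hc, if_neg hd]; exact ih _ h'

-- ===== VERDICT (by name: the statement is the Claim_ definition above) =====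
theorem extractlastnumber_spec : Claim_equal_extractlastnumber := by
  intro string _
  unfold Spec_extractlastnumber extractlastnumber extractlastnumber_alt
  set s := string.toList with hs
  by_cases hmem : ' ' ∈ s
  · obtain ⟨pre, suf, heq, hns⟩ := exists_last_split s hmem
    -- A side: rfind points at pre.length
    have hget : s[pre.length]? = some ' ' := by
      rw [heq]; simp
    have habove : ∀ j, pre.length < j → j ≤ s.length → s[j]? ≠ some ' ' := by
      intro j h1 _ hc
      apply hns
      rw [heq, List.getElem?_append_right (by omega)] at hc
      obtain ⟨k, hk⟩ : ∃ k, j - pre.length = k + 1 := ⟨j - pre.length - 1, by omega⟩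
      rw [hk, List.getElem?_cons_succ] at hc
      exact List.mem_of_getElem? hc
    have hlenle : pre.length ≤ s.length := by
      rw [heq]; simp
    have hrf : PySem.Chars.rfind s [' '] = (pre.length : Int) := by
      unfold PySem.Chars.rfind
      exact rfind_go_last s s.length pre.length hlenle hget habove
    have hne : (pre.length : Int) ≠ -1 := by omega
    simp only [hrf, if_pos hne]
    -- the slice after the last space is suf
    have hslice : PySem.List.slice s (some ((pre.length : Int) + 1)) none = suf := by
      have : ((pre.length : Int) + 1) = ((pre.length + 1 : Nat) : Int) := by push_cast; ring
      rw [this, PySem.List.slice_from_natCast, heq]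
      rw [show pre ++ ' ' :: suf = (pre ++ [' ']) ++ suf by simp,
          show pre.length + 1 = (pre ++ [' ']).length by simp,
          List.drop_left]
    rw [hslice]
    -- B side
    have hrev : s.reverse = suf.reverse ++ ' ' :: pre.reverse := by
      rw [heq]; simp
    have hnsrev : ' ' ∉ suf.reverse := by simpa using hns
    rw [hrev, altGo_no_space suf.reverse pre.reverse [] hnsrev]
    simp only [List.filter_reverse, List.reverse_reverse, List.append_nil]
    by_cases hfe : suf.filter PySem.Chars.isdigit = []
    · simp [hfe]
    · simp [hfe]
  · -- no space at all: A's rfind is -1, B's scan never stops at a space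
    have hrf : PySem.Chars.rfind s [' '] = -1 := by
      unfold PySem.Chars.rfind
      apply rfind_go_no_space
      intro j _ hc
      exact hmem (List.mem_of_getElem? hc)
    have hnr : ' ' ∉ s.reverse := by simpa using hmem
    simp [hrf, altGo_all_no_space s.reverse [] hnr]
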